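-- pv_equiv track=rewrite | github.com/adhitama19/Adhitama-Budi-210CT-Assignment | 210CT-Week-1/wkone_old.py | shuffle_number
-- ===== SOURCE A (Python) =====
-- def shuffle_number(numbers):
--     empty_lst = []
--
--     for i in numbers:
--         empty_lst.append(i)
--
--     empty_lst.insert(4, empty_lst.pop(3))
--     empty_lst.insert(3, empty_lst.pop(2))
--     empty_lst.insert(0, empty_lst.pop(4))
--
--
--
--     return empty_lst
-- ===== SOURCE B (Python) =====
-- def shuffle_number(numbers):
--     lst = list(numbers)
--     return [lst[3], lst[0], lst[1], lst[4], lst[2]] + lst[5:]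
-- ===== Notes on version B (the rewrite author's own statement) =====
-- stated objective: simpler
-- what changed: B builds the permuted result directly by index mapping ([lst[3], lst[0], lst[1], lst[4], lst[2]] + lst[5:]) instead of simulating three pop/insert moves on a mutated copy.
import Mathlib
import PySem

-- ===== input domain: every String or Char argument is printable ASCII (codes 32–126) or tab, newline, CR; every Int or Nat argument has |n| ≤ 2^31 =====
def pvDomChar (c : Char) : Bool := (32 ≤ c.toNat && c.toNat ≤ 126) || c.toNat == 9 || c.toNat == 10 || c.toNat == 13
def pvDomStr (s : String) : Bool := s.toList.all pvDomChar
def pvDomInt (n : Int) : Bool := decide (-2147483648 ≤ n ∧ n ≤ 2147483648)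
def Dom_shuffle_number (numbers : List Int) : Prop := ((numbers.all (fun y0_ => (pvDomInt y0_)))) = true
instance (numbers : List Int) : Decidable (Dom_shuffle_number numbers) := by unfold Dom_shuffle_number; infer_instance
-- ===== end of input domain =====

-- B replaces A's three pop/insert moves by direct index construction; objective: simpler.

-- ===== PORT A =====
-- copy loop, then insert(4, pop(3)); insert(3, pop(2)); insert(0, pop(4)); each pop may fail (IndexError → none; Pre_ excludes)
def shuffle_number (numbers : List Int) : List Int :=
  let empty_lst := numbers.foldl (fun acc i => acc ++ [i]) []
  match PySem.List.pop? empty_lst 3 with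
  | none => []
  | some (v1, l1) =>
    let l2 := PySem.List.insert l1 4 v1
    match PySem.List.pop? l2 2 with
    | none => []
    | some (v2, l3) =>
      let l4 := PySem.List.insert l3 3 v2
      match PySem.List.pop? l4 4 with
      | none => []
      | some (v3, l5) => PySem.List.insert l5 0 v3

-- ===== PORT B =====
def shuffle_number_alt (numbers : List Int) : List Int :=
  let lst := numbers
  match PySem.List.pyGet? lst 3, PySem.List.pyGet? lst 0, PySem.List.pyGet? lst 1,
        PySem.List.pyGet? lst 4, PySem.List.pyGet? lst 2 with
  | some a, some b, some c, some d, some e => [a, b, c, d, e] ++ PySem.List.slice lst (some 5) none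
  | _, _, _, _, _ => []

-- ===== PRECONDITION & SPEC =====
-- Pre_ excludes lists of fewer than 5 elements, on which A's pop(4) (or pop(3)) raises IndexError (B's lst[3]/lst[4] raise too).
def Pre_shuffle_number (numbers : List Int) : Prop := 5 ≤ numbers.length
instance (numbers : List Int) : Decidable (Pre_shuffle_number numbers) := by unfold Pre_shuffle_number; infer_instance
def pvWitness_shuffle_number : List Int := [10, 20, 30, 40, 50, 60]
def Spec_shuffle_number (numbers : List Int) (out : List Int) : Prop := out = shuffle_number_alt numbers
instance (numbers : List Int) (out : List Int) : Decidable (Spec_shuffle_number numbers out) := by unfold Spec_shuffle_number; infer_instance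

-- ===== CLAIM (what is proved, stated in full; the proofs are below) =====
def Claim_equal_shuffle_number : Prop := ∀ (numbers : List Int), Dom_shuffle_number numbers → Pre_shuffle_number numbers → Spec_shuffle_number numbers (shuffle_number numbers)

-- ===== LEMMAS AND PROOFS =====
theorem foldl_append_singleton_id (xs : List Int) : xs.foldl (fun acc i => acc ++ [i]) [] = xs := by
  simpa using PySem.List.foldl_append_singleton_eq_map (f := fun i => i) (l := xs)

theorem shuffleA_cons (a b c d e : Int) (rest : List Int) :
    shuffle_number (a::b::c::d::e::rest) = d::a::b::e::c::rest := by
  have p1 : PySem.List.pop? (a::b::c::d::e::rest) 3 = some (d, a::b::c::e::rest) := by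
    rw [show (3:Int) = ((3:Nat):Int) by norm_num, PySem.List.pop?_natCast _ _ (by simp)]; simp
  have i1 : PySem.List.insert (a::b::c::e::rest) 4 d = a::b::c::e::d::rest := by
    rw [PySem.List.insert_ofNat _ _ _ (by simp)]; simp
  have p2 : PySem.List.pop? (a::b::c::e::d::rest) 2 = some (c, a::b::e::d::rest) := by
    rw [show (2:Int) = ((2:Nat):Int) by norm_num, PySem.List.pop?_natCast _ _ (by simp)]; simp
  have i2 : PySem.List.insert (a::b::e::d::rest) 3 c = a::b::e::c::d::rest := by
    rw [PySem.List.insert_ofNat _ _ _ (by simp)]; simp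
  have p3 : PySem.List.pop? (a::b::e::c::d::rest) 4 = some (d, a::b::e::c::rest) := by
    rw [show (4:Int) = ((4:Nat):Int) by norm_num, PySem.List.pop?_natCast _ _ (by simp)]; simp
  unfold shuffle_number
  simp only [foldl_append_singleton_id, p1, i1, p2, i2, p3, PySem.List.insert_zero]

theorem shuffleB_cons (a b c d e : Int) (rest : List Int) :
    shuffle_number_alt (a::b::c::d::e::rest) = d::a::b::e::c::rest := by
  have g3 : PySem.List.pyGet? (a::b::c::d::e::rest) 3 = some d := by
    rw [show (3:Int) = ((3:Nat):Int) by norm_num, PySem.List.pyGet?_ofNat (h := by simp)]; simp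
  have g0 : PySem.List.pyGet? (a::b::c::d::e::rest) 0 = some a := PySem.List.pyGet?_zero_cons ..
  have g1 : PySem.List.pyGet? (a::b::c::d::e::rest) 1 = some b := by
    rw [show (1:Int) = ((1:Nat):Int) by norm_num, PySem.List.pyGet?_ofNat (h := by simp)]; simp
  have g4 : PySem.List.pyGet? (a::b::c::d::e::rest) 4 = some e := by
    rw [show (4:Int) = ((4:Nat):Int) by norm_num, PySem.List.pyGet?_ofNat (h := by simp)]; simp
  have g2 : PySem.List.pyGet? (a::b::c::d::e::rest) 2 = some c := by
    rw [show (2:Int) = ((2:Nat):Int) by norm_num, PySem.List.pyGet?_ofNat (h := by simp)]; simp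
  have sl : PySem.List.slice (a::b::c::d::e::rest) (some 5) none = rest := by
    rw [show (5:Int) = ((5:Nat):Int) by norm_num, PySem.List.slice_from_natCast]; simp
  unfold shuffle_number_alt
  simp only [g3, g0, g1, g4, g2, sl]
  simp

-- ===== VERDICT (by name: the statement is the Claim_ definition above) =====
theorem shuffle_number_spec : Claim_equal_shuffle_number := by
  intro numbers _ hpre
  unfold Pre_shuffle_number at hpre
  obtain ⟨a, b, c, d, e, rest, rfl⟩ :
      ∃ a b c d e rest, numbers = a :: b :: c :: d :: e :: rest := by
    match numbers, hpre with
    | a :: b :: c :: d :: e :: rest, _ => exact ⟨a, b, c, d, e, rest, rfl⟩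
  unfold Spec_shuffle_number
  rw [shuffleA_cons, shuffleB_cons]
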